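-- pv_equiv track=rewrite | github.com/orenvlad-ai/wb-core | packages/application/simple_xlsx.py | _format_code_is_date_like
-- ===== SOURCE A (Python) =====
-- def _format_code_is_date_like(format_code: str) -> bool:
--     normalized = format_code.lower()
--     if not normalized:
--         return False
--     in_quote = False
--     cleaned = []
--     for char in normalized:
--         if char == '"':
--             in_quote = not in_quote
--             continue
--         if in_quote:
--             continue
--         cleaned.append(char)
--     normalized = "".join(cleaned)
--     return any(token in normalized for token in ("yy", "dd", "mm", "m/", "d/"))
-- ===== SOURCE B (Python) =====
-- def _format_code_is_date_like(format_code: str) -> bool: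
--     # Split on double quotes: even-indexed segments are exactly the text outside quotes.
--     parts = format_code.lower().split('"')
--     cleaned = "".join(seg for i, seg in enumerate(parts) if i % 2 == 0)
--     return any(token in cleaned for token in ("yy", "dd", "mm", "m/", "d/"))
-- ===== Notes on version B (the rewrite author's own statement) =====
-- stated objective: idiomatic
-- what changed: Replaces the char-by-char in_quote toggle loop with a split-on-quote pass joining the even-indexed (outside-quote) segments; the empty-string guard is dropped since it falls out of the split; the C-level split/join makes it measurably faster too.
import Mathlib
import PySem

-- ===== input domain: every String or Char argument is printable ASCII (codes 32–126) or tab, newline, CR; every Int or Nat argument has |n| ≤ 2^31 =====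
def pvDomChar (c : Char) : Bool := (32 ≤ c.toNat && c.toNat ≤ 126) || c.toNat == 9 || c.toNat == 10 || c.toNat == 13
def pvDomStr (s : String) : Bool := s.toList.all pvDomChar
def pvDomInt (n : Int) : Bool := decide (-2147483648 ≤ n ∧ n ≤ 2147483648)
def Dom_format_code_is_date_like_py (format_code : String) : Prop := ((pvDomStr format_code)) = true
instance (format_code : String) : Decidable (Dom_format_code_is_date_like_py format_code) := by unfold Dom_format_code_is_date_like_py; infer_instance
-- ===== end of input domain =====

-- B replaces A's char-by-char in_quote toggle with a split-on-'"' pass keeping the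
-- even-indexed (outside-quote) segments: more idiomatic, and measurably faster in
-- CPython (C-level split/join instead of a Python-level per-character loop).

-- ===== PORT A =====
def format_code_is_date_like_py (format_code : String) : Bool :=
  let normalized := PySem.Str.lower format_code
  if PySem.Str.len normalized == 0 then false
  else
    let st := normalized.toList.foldl
      (fun (st : Bool × List Char) char =>
        if char = '"' then (!st.1, st.2)
        else if st.1 then st
        else (st.1, st.2 ++ [char])) (false, ([] : List Char))
    let normalized2 := PySem.Chars.join [] (st.2.map (fun c => [c]))
    [("yy" : String), "dd", "mm", "m/", "d/"].any
      (fun token => PySem.Chars.isIn token.toList normalized2)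

-- ===== PORT B =====
def format_code_is_date_like_py_alt (format_code : String) : Bool :=
  let parts := PySem.Chars.splitOn (PySem.Str.lower format_code).toList ['"']
  let cleaned := PySem.Chars.join []
    (((PySem.List.enumerate parts).filter (fun p => p.1 % 2 == 0)).map Prod.snd)
  [("yy" : String), "dd", "mm", "m/", "d/"].any
    (fun token => PySem.Chars.isIn token.toList cleaned)

-- ===== PRECONDITION & SPEC =====
def Spec_format_code_is_date_like_py (format_code : String) (out : Bool) : Prop := out = format_code_is_date_like_py_alt format_code
instance (format_code : String) (out : Bool) : Decidable (Spec_format_code_is_date_like_py format_code out) := by unfold Spec_format_code_is_date_like_py; infer_instance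

-- ===== CLAIM (what is proved, stated in full; the proofs are below) =====
def Claim_equal_format_code_is_date_like_py : Prop := ∀ (format_code : String), Dom_format_code_is_date_like_py format_code → Spec_format_code_is_date_like_py format_code (format_code_is_date_like_py format_code)

-- ===== LEMMAS AND PROOFS =====

-- A's toggle loop, as a structural recursion (proof helper only).
def cleanA : List Char → Bool → List Char
  | [], _ => []
  | c :: t, inq =>
      if c == '"' then cleanA t (!inq)
      else if inq then cleanA t inq
      else c :: cleanA t inq

-- Keep/skip alternation over segments (proof helper only).
def joinAlt : Bool → List (List Char) → List Char
  | _, [] => []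
  | true, a :: t => a ++ joinAlt false t
  | false, _ :: t => joinAlt true t

lemma foldl_cleanA (cs : List Char) : ∀ (inq : Bool) (acc : List Char),
    (cs.foldl (fun (st : Bool × List Char) char =>
        if char = '"' then (!st.1, st.2)
        else if st.1 then st
        else (st.1, st.2 ++ [char])) (inq, acc)).2 = acc ++ cleanA cs inq := by
  induction cs with
  | nil => intro inq acc; simp [cleanA]
  | cons c t ih =>
      intro inq acc
      simp only [List.foldl_cons]
      by_cases hc : c = '"'
      · subst hc; simp [cleanA, ih]
      · by_cases hq : inq
        · simp [cleanA, hc, hq, ih]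
        · simp [cleanA, hc, hq, ih]

lemma joinAlt_modifyHead_cons (b : Bool) (c : Char) (l : List (List Char)) (hl : l ≠ []) :
    joinAlt b (List.modifyHead (List.cons c) l)
      = if b then c :: joinAlt b l else joinAlt b l := by
  cases l with
  | nil => exact absurd rfl hl
  | cons a t => cases b <;> simp [joinAlt]

lemma cleanA_eq_joinAlt (cs : List Char) : ∀ inq : Bool,
    cleanA cs inq = joinAlt (!inq) (cs.splitOnP (fun x => x == '"')) := by
  induction cs with
  | nil => intro inq; cases inq <;> simp [cleanA, List.splitOnP_nil, joinAlt]
  | cons c t ih =>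
      intro inq
      by_cases hc : c == '"'
      · have h : (fun x => x == '"') c = true := hc
        rw [List.splitOnP_cons]
        simp only [h, if_pos]
        cases inq <;> simp [cleanA, hc, ih, joinAlt]
      · have h : (fun x => x == '"') c = false := by simpa using hc
        rw [List.splitOnP_cons]
        simp only [h, Bool.false_eq_true, if_false]
        rw [joinAlt_modifyHead_cons _ _ _ (List.splitOnP_ne_nil _ t)]
        cases inq <;> simp [cleanA, hc, ih]

lemma modifyHead_id' (l : List (List Char)) :
    List.modifyHead (fun x => x) l = l := by
  cases l <;> simp

lemma splitOn_go_spec : ∀ (fuel : Nat) (cs cur : List Char) (acc : List (List Char)),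
    cs.length ≤ fuel →
    PySem.Chars.splitOn.go ['"'] fuel cs cur acc
      = acc.reverse ++ List.modifyHead (fun x => cur.reverse ++ x)
          (cs.splitOnP (fun x => x == '"')) := by
  intro fuel
  induction fuel with
  | zero =>
      intro cs cur acc h
      have : cs = [] := List.eq_nil_of_length_eq_zero (Nat.le_zero.mp h)
      subst this
      simp [PySem.Chars.splitOn.go, List.splitOnP_nil]
  | succ n ih =>
      intro cs cur acc h
      cases cs with
      | nil => simp [PySem.Chars.splitOn.go, List.splitOnP_nil]
      | cons c rest =>
          by_cases hc : c = '"'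
          · subst hc
            have hpre : List.isPrefixOf ['"'] ('"' :: rest) = true := by
              simp [List.isPrefixOf]
            rw [PySem.Chars.splitOn.go]
            simp only [hpre, if_pos]
            rw [ih _ _ _ (by simpa using Nat.le_of_succ_le_succ h)]
            rw [List.splitOnP_cons]
            simp [modifyHead_id']
          · have hpre : List.isPrefixOf ['"'] (c :: rest) = false := by
              have := Ne.symm hc
              simp [List.isPrefixOf, this]
            rw [PySem.Chars.splitOn.go]
            simp only [hpre, Bool.false_eq_true, if_false]
            rw [ih _ _ _ (by simpa using Nat.le_of_succ_le_succ h)]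
            rw [List.splitOnP_cons]
            have hcb : (fun x => x == '"') c = false := by simpa using hc
            simp only [hcb, Bool.false_eq_true, if_false, List.modifyHead_modifyHead]
            have hfg : ((fun x => cur.reverse ++ x) ∘ List.cons c)
                = fun x => (c :: cur).reverse ++ x := by
              funext x; simp
            rw [hfg]

lemma splitOn_eq_splitOnP (cs : List Char) :
    PySem.Chars.splitOn cs ['"'] = cs.splitOnP (fun x => x == '"') := by
  rw [PySem.Chars.splitOn, splitOn_go_spec _ _ _ _ (Nat.le_succ_of_le (Nat.le_refl _))]
  simp only [List.reverse_nil, List.nil_append]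
  exact modifyHead_id' _

lemma join_nil_eq_flatten (l : List (List Char)) :
    PySem.Chars.join [] l = l.flatten := by
  induction l with
  | nil => simp [PySem.Chars.join, List.intercalate]
  | cons a t ih =>
      cases t with
      | nil => simp [PySem.Chars.join, List.intercalate]
      | cons b t' =>
          simp [PySem.Chars.join, List.intercalate] at ih ⊢
          simpa using ih

lemma enumerate_even_joinAlt (l : List (List Char)) : ∀ (k : Int), 0 ≤ k →
    (((PySem.List.enumerate l k).filter (fun p => p.1 % 2 == 0)).map Prod.snd).flatten
      = joinAlt (k % 2 == 0) l := by
  induction l with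
  | nil => intro k hk; simp [PySem.List.enumerate, joinAlt]
  | cons a t ih =>
      intro k hk
      by_cases hp : k % 2 = 0
      · have h2 : (k + 1) % 2 ≠ 0 := by omega
        have hb1 : (k % 2 == 0) = true := by simpa using hp
        have hb2 : ((k + 1) % 2 == 0) = false := by simpa using h2
        simp [PySem.List.enumerate, hb1, hb2, joinAlt, ih (k+1) (by omega)]
      · have h2 : (k + 1) % 2 = 0 := by omega
        have hb1 : (k % 2 == 0) = false := by simpa using hp
        have hb2 : ((k + 1) % 2 == 0) = true := by simpa using h2
        simp [PySem.List.enumerate, hb1, hb2, joinAlt, ih (k+1) (by omega)]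

-- ===== VERDICT (by name: the statement is the Claim_ definition above) =====
theorem format_code_is_date_like_py_spec : Claim_equal_format_code_is_date_like_py := by
  intro s _
  unfold Spec_format_code_is_date_like_py
  unfold format_code_is_date_like_py format_code_is_date_like_py_alt
  simp only []
  have hB : PySem.Chars.join []
      (((PySem.List.enumerate (PySem.Chars.splitOn (PySem.Str.lower s).toList ['"'])).filter
        (fun p => p.1 % 2 == 0)).map Prod.snd)
      = joinAlt true ((PySem.Str.lower s).toList.splitOnP (fun x => x == '"')) := by
    rw [join_nil_eq_flatten, splitOn_eq_splitOnP,
        enumerate_even_joinAlt _ 0 (by norm_num)]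
    norm_num
  rw [hB]
  by_cases h0 : (PySem.Str.len (PySem.Str.lower s) == 0) = true
  · have hcs : (PySem.Str.lower s).toList = [] := by
      simp only [PySem.Str.len, beq_iff_eq, Nat.cast_eq_zero, List.length_eq_zero_iff] at h0
      exact h0
    rw [hcs]
    simp only [h0, if_true]
    decide
  · simp only [h0, Bool.false_eq_true, if_false]
    rw [foldl_cleanA, PySem.Chars.join_nil_singletons, cleanA_eq_joinAlt]
    simp
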